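-- pv_equiv track=rewrite | github.com/AdrianAxelsson/aoc-2022 | 8/main.py | tree_is_hidden
-- ===== SOURCE A (Python) =====
-- def tree_is_hidden(grid, pos):
--     y, x = pos
--     y_len = len(grid)
--     x_len = len(grid[0])
--     hidden_top = False
--     hidden_bot = False
--     hidden_left = False
--     hidden_right = False
--     hidden = False
--
--     for i in range(y_len):
--         if i == y:
--             continue
--         if grid[y][x] <= grid[i][x]:
--             if i < y:
--                 hidden_top = True
--             else:
--                 hidden_bot = True
--             if hidden_top and hidden_bot:
--                 break
--
--     for i in range(x_len):
--         if i == x: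
--             continue
--         if grid[y][x] <= grid[y][i]:
--             if i < x:
--                 hidden_left = True
--             else:
--                 hidden_right = True
--             if hidden_right and hidden_left:
--                 break
--     if hidden_left and hidden_right and hidden_top and hidden_bot:
--         hidden = True
--
--     return hidden
-- ===== SOURCE B (Python) =====
-- def tree_is_hidden(grid, pos):
--     y, x = pos
--     h = grid[y][x]
--     up = down = left = right = None
--     for i, row in enumerate(grid):
--         for j, v in enumerate(row):
--             if j == x and i < y:
--                 up = v if up is None else max(up, v)
--             elif j == x and i > y:
--                 down = v if down is None else max(down, v)
--             elif i == y and j < x: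
--                 left = v if left is None else max(left, v)
--             elif i == y and j > x:
--                 right = v if right is None else max(right, v)
--     return all(m is not None and m >= h for m in (up, down, left, right))
-- ===== Notes on version B (the rewrite author's own statement) =====
-- stated objective: alternative
-- what changed: Replaces A's two directional scans of the pivot's row and column (four break-coupled boolean flags) with a single pass over every cell of the grid that classifies each cell into one of four directions and maintains four running maxima, finally comparing each maximum to the tree's height; it trades targeted O(rows+cols) scanning for one uniform whole-grid aggregation.
-- outside the precondition, e.g. on tree_is_hidden([[1, 1], [1, 1, 9], [1, 1]], (1, 1)): A returns False, B returns True; on tree_is_hidden([], (0, 0)): A raises IndexError, B raises IndexError; on tree_is_hidden([[1, 2], [3]], (0, 1)): A raises IndexError, B returns False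
import Mathlib
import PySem

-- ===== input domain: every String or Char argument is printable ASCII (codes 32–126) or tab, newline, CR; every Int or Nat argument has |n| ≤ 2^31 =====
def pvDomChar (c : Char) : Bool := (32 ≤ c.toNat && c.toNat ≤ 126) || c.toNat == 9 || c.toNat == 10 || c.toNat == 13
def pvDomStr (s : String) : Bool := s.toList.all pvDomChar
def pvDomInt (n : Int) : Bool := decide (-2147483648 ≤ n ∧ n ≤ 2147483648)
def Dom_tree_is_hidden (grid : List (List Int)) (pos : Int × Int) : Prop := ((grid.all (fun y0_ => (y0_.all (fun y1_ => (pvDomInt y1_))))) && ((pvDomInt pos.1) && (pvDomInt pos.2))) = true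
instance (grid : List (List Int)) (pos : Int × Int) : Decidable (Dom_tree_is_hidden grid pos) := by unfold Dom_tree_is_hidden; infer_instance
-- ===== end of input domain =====

-- B replaces A's two flagged directional scans (row + column, four break-coupled booleans)
-- with a single pass over every cell of the grid that maintains four running directional
-- maxima, compared against the tree's height at the end; alternative decomposition, not faster.


-- grid[i][j] with Python indexing; total form, exact on inputs admitted by Pre_ (both
-- indices in range); used by both ports as the common transliteration of 'grid[i][j]'.
def idx2 (grid : List (List Int)) (i j : Int) : Int :=
  PySem.List.pyGetD (PySem.List.pyGetD grid i []) j 0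

-- ===== PORT A =====
-- A's two for-loops have the identical shape (skip the pivot index, set the low/high
-- flag on a blocker, break when both are set); this recursion is that loop body, used
-- once per axis with the axis's pivot and accessor.
def tihA_loop (pivot h : Int) (get : Int → Int) : List Int → Bool → Bool → Bool × Bool
  | [], lo, hi => (lo, hi)
  | i :: rest, lo, hi =>
    if i = pivot then tihA_loop pivot h get rest lo hi
    else if h ≤ get i then
      let lo' := if i < pivot then true else lo
      let hi' := if i < pivot then hi else true
      if lo' && hi' then (lo', hi')
      else tihA_loop pivot h get rest lo' hi'
    else tihA_loop pivot h get rest lo hi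

def tree_is_hidden (grid : List (List Int)) (pos : Int × Int) : Bool :=
  let y := pos.1
  let x := pos.2
  let y_len : Int := (grid.length : Int)
  let x_len : Int := ((PySem.List.pyGetD grid 0 []).length : Int)
  let tb := tihA_loop y (idx2 grid y x) (fun i => idx2 grid i x)
              (PySem.List.pyRange 0 y_len 1) false false
  let lr := tihA_loop x (idx2 grid y x) (fun i => idx2 grid y i)
              (PySem.List.pyRange 0 x_len 1) false false
  lr.1 && lr.2 && tb.1 && tb.2

-- ===== PORT B =====
-- 'v if m is None else max(m, v)': the running directional maximum.
def omax (o : Option Int) (v : Int) : Option Int :=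
  match o with
  | none => some v
  | some m => some (max m v)

-- the body of B's inner loop: classify cell (i, q.1) against the pivot and update
-- the matching running maximum in the state (up, down, left, right).
def bInner (y x i : Int) (s : Option Int × Option Int × Option Int × Option Int)
    (q : Int × Int) : Option Int × Option Int × Option Int × Option Int :=
  if q.1 = x ∧ i < y then (omax s.1 q.2, s.2.1, s.2.2.1, s.2.2.2)
  else if q.1 = x ∧ y < i then (s.1, omax s.2.1 q.2, s.2.2.1, s.2.2.2)
  else if i = y ∧ q.1 < x then (s.1, s.2.1, omax s.2.2.1 q.2, s.2.2.2)
  else if i = y ∧ x < q.1 then (s.1, s.2.1, s.2.2.1, omax s.2.2.2 q.2)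
  else s

-- 'm is not None and m >= h'
def okh (h : Int) (o : Option Int) : Bool :=
  match o with
  | none => false
  | some m => decide (h ≤ m)

def tree_is_hidden_alt (grid : List (List Int)) (pos : Int × Int) : Bool :=
  let y := pos.1
  let x := pos.2
  let h := idx2 grid y x
  let s := (PySem.List.enumerate grid 0).foldl
      (fun s p => (PySem.List.enumerate p.2 0).foldl (bInner y x p.1) s)
      (none, none, none, none)
  okh h s.1 && okh h s.2.1 && okh h s.2.2.1 && okh h s.2.2.2

-- ===== PRECONDITION & SPEC =====
-- Pre_ excludes (a) empty grids and out-of-range positions, on which A raises IndexError,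
-- and (b) ragged grids (rows of unequal length), a corner the word 'grid' never specifies:
-- there A either raises or accidentally bounds its row scan by row 0's length, while B
-- naturally scans each row as it is.
def Pre_tree_is_hidden (grid : List (List Int)) (pos : Int × Int) : Prop :=
  grid ≠ [] ∧
  PySem.Raise.InRange grid.length pos.1 ∧
  (∀ row ∈ grid, row.length = (PySem.List.pyGetD grid 0 []).length) ∧
  PySem.Raise.InRange (PySem.List.pyGetD grid 0 []).length pos.2
instance (grid : List (List Int)) (pos : Int × Int) : Decidable (Pre_tree_is_hidden grid pos) := by
  unfold Pre_tree_is_hidden; infer_instance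

def pvWitness_tree_is_hidden : List (List Int) × (Int × Int) :=
  ([[3, 1, 3], [1, 0, 1], [3, 1, 3]], (1, 1))

def Spec_tree_is_hidden (grid : List (List Int)) (pos : Int × Int) (out : Bool) : Prop := out = tree_is_hidden_alt grid pos
instance (grid : List (List Int)) (pos : Int × Int) (out : Bool) : Decidable (Spec_tree_is_hidden grid pos out) := by unfold Spec_tree_is_hidden; infer_instance

-- ===== CLAIM (what is proved, stated in full; the proofs are below) =====
def Claim_equal_tree_is_hidden : Prop := ∀ (grid : List (List Int)) (pos : Int × Int), Dom_tree_is_hidden grid pos → Pre_tree_is_hidden grid pos → Spec_tree_is_hidden grid pos (tree_is_hidden grid pos)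

-- ===== LEMMAS AND PROOFS =====

-- A's loop computes, per flag, exactly 'some scanned index on that side carries a blocker';
-- the break fires only after both flags are true, so it never changes the final flags.
theorem tihA_loop_char (pivot h : Int) (get : Int → Int) (idxs : List Int) (lo hi : Bool) :
    tihA_loop pivot h get idxs lo hi =
      (lo || idxs.any (fun i => decide (i < pivot) && decide (h ≤ get i)),
       hi || idxs.any (fun i => decide (pivot < i) && decide (h ≤ get i))) := by
  induction idxs generalizing lo hi with
  | nil => simp [tihA_loop]
  | cons i rest ih =>
    by_cases hip : i = pivot
    · subst hip
      simp [tihA_loop, ih]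
    · by_cases hb : h ≤ get i
      · by_cases hlt : i < pivot
        · have hnp : ¬ pivot < i := by omega
          cases hi with
          | true => simp [tihA_loop, hip, hb, hlt, hnp]
          | false => simp [tihA_loop, hip, hb, hlt, hnp, ih]
        · have hp : pivot < i := by omega
          cases lo with
          | true => simp [tihA_loop, hip, hb, hlt, hp]
          | false => simp [tihA_loop, hip, hb, hlt, hp, ih]
      · simp [tihA_loop, hip, hb, ih]

theorem any_none_below (pivot : Int) (hneg : pivot < 0) (n : Int) (p : Int → Bool) :
    (PySem.List.pyRange 0 n 1).any (fun i => decide (i < pivot) && p i) = false := by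
  rw [List.any_eq_false]
  intro i hi
  rw [PySem.List.mem_pyRange_one] at hi
  have : ¬ i < pivot := by omega
  simp [this]

theorem bool_perm (a b c d : Bool) : (c && d && a && b) = (a && b && c && d) := by
  cases a <;> cases b <;> cases c <;> cases d <;> rfl

-- the values of row whose (enumerate) index satisfies c
def pickVals (c : Int → Bool) (row : List Int) (b : Int) : List Int :=
  (PySem.List.enumerate row b).filterMap (fun q => if c q.1 then some q.2 else none)

theorem pickVals_cons (c : Int → Bool) (v : Int) (rest : List Int) (b : Int) :
    pickVals c (v :: rest) b = (if c b then [v] else []) ++ pickVals c rest (b + 1) := by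
  by_cases h : c b <;> simp [pickVals, PySem.List.enumerate_cons, h]

-- the values of grid on cells whose row index satisfies r and column index satisfies c
def dirVals (r c : Int → Bool) (grid : List (List Int)) (a : Int) : List Int :=
  (PySem.List.enumerate grid a).flatMap (fun p => if r p.1 then pickVals c p.2 0 else [])

theorem dirVals_cons (r c : Int → Bool) (row : List Int) (rest : List (List Int)) (a : Int) :
    dirVals r c (row :: rest) a =
      (if r a then pickVals c row 0 else []) ++ dirVals r c rest (a + 1) := by
  simp [dirVals, PySem.List.enumerate_cons]

theorem okh_omax (h : Int) (o : Option Int) (v : Int) :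
    okh h (omax o v) = (okh h o || decide (h ≤ v)) := by
  cases o with
  | none => simp [okh, omax]
  | some m =>
    simp only [okh, omax, le_max_iff]
    rw [Bool.eq_iff_iff]; simp

theorem okh_foldl (h : Int) (l : List Int) (o : Option Int) :
    okh h (l.foldl omax o) = (okh h o || l.any (fun v => decide (h ≤ v))) := by
  induction l generalizing o with
  | nil => simp
  | cons v rest ih => simp [ih, okh_omax, Bool.or_assoc]

-- B's inner loop updates the four maxima independently: each component folds omax over
-- exactly the row values its direction selects.
theorem inner_char (y x i : Int) (row : List Int) (b : Int)
    (s : Option Int × Option Int × Option Int × Option Int) :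
    (PySem.List.enumerate row b).foldl (bInner y x i) s =
      ( if i < y then List.foldl omax s.1 (pickVals (fun j => decide (j = x)) row b) else s.1,
        if y < i then List.foldl omax s.2.1 (pickVals (fun j => decide (j = x)) row b) else s.2.1,
        if i = y then List.foldl omax s.2.2.1 (pickVals (fun j => decide (j < x)) row b) else s.2.2.1,
        if i = y then List.foldl omax s.2.2.2 (pickVals (fun j => decide (x < j)) row b) else s.2.2.2 ) := by
  induction row generalizing b s with
  | nil => obtain ⟨u, d, l, r⟩ := s; simp [pickVals]
  | cons v rest ih =>
    rw [PySem.List.enumerate_cons, List.foldl_cons, ih]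
    rw [pickVals_cons, pickVals_cons, pickVals_cons, List.foldl_append, List.foldl_append,
        List.foldl_append]
    obtain ⟨u, d, l, r⟩ := s
    by_cases h1 : b = x ∧ i < y
    · obtain ⟨hbx, hiy⟩ := h1
      subst hbx
      have n2 : ¬ y < i := by omega
      have n3 : ¬ i = y := by omega
      simp [bInner, hiy, n2, n3]
    · by_cases h2 : b = x ∧ y < i
      · obtain ⟨hbx, hiy⟩ := h2
        subst hbx
        have n1 : ¬ i < y := by omega
        have n3 : ¬ i = y := by omega
        simp [bInner, hiy, n1, n3]
      · by_cases h3 : i = y ∧ b < x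
        · obtain ⟨hiy, hbx⟩ := h3
          subst hiy
          have nb : ¬ b = x := by omega
          have nb2 : ¬ x < b := by omega
          simp [bInner, hbx, nb, nb2]
        · by_cases h4 : i = y ∧ x < b
          · obtain ⟨hiy, hbx⟩ := h4
            subst hiy
            have n1 : ¬ i < i := by omega
            have nb : ¬ b = x := by omega
            have nb2 : ¬ b < x := by omega
            simp [bInner, hbx, nb, nb2]
          · simp only [bInner, if_neg h1, if_neg h2, if_neg h3, if_neg h4]
            rcases lt_trichotomy i y with h | h | h
            · have hb : ¬ b = x := fun hh => h1 ⟨hh, h⟩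
              have n2 : ¬ y < i := by omega
              have n3 : ¬ i = y := by omega
              simp [h, hb, n2, n3]
            · subst h
              have hb1 : ¬ b < x := fun hh => h3 ⟨rfl, hh⟩
              have hb2 : ¬ x < b := fun hh => h4 ⟨rfl, hh⟩
              simp [hb1, hb2]
            · have hb : ¬ b = x := fun hh => h2 ⟨hh, h⟩
              have n1 : ¬ i < y := by omega
              have n3 : ¬ i = y := by omega
              simp [h, hb, n1, n3]

theorem outer_char (y x : Int) (grid : List (List Int)) (a : Int)
    (s : Option Int × Option Int × Option Int × Option Int) :
    (PySem.List.enumerate grid a).foldl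
        (fun s p => (PySem.List.enumerate p.2 0).foldl (bInner y x p.1) s) s =
      ( List.foldl omax s.1 (dirVals (fun i => decide (i < y)) (fun j => decide (j = x)) grid a),
        List.foldl omax s.2.1 (dirVals (fun i => decide (y < i)) (fun j => decide (j = x)) grid a),
        List.foldl omax s.2.2.1 (dirVals (fun i => decide (i = y)) (fun j => decide (j < x)) grid a),
        List.foldl omax s.2.2.2 (dirVals (fun i => decide (i = y)) (fun j => decide (x < j)) grid a) ) := by
  induction grid generalizing a s with
  | nil => obtain ⟨u, d, l, r⟩ := s; simp [dirVals]
  | cons row rest ih =>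
    rw [PySem.List.enumerate_cons, List.foldl_cons, inner_char, ih,
        dirVals_cons, dirVals_cons, dirVals_cons, dirVals_cons,
        List.foldl_append, List.foldl_append, List.foldl_append, List.foldl_append]
    obtain ⟨u, d, l, r⟩ := s
    rcases lt_trichotomy a y with h | h | h
    · have n2 : ¬ y < a := by omega
      have n3 : ¬ a = y := by omega
      simp [h, n2, n3]
    · subst h
      simp
    · have n1 : ¬ a < y := by omega
      have n3 : ¬ a = y := by omega
      simp [h, n1, n3]

theorem pickVals_any (c : Int → Bool) (p : Int → Bool) (row : List Int) (b : Int) :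
    (pickVals c row b).any p = (PySem.List.enumerate row b).any (fun q => c q.1 && p q.2) := by
  induction row generalizing b with
  | nil => rfl
  | cons v rest ih =>
    rw [pickVals_cons, PySem.List.enumerate_cons]
    by_cases h : c b <;> simp [h, ih]

theorem dirVals_any (r c : Int → Bool) (p : Int → Bool) (grid : List (List Int)) (a : Int) :
    (dirVals r c grid a).any p =
      (PySem.List.enumerate grid a).any
        (fun q => r q.1 && (PySem.List.enumerate q.2 0).any (fun w => c w.1 && p w.2)) := by
  rw [dirVals, List.any_flatMap]
  congr 1
  funext q
  by_cases h : r q.1 <;> simp [h, pickVals_any]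

-- ===== VERDICT (by name: the statement is the Claim_ definition above) =====
theorem enum_any_rows (xs : List (List Int)) (g : Int × List Int → Bool) :
    (PySem.List.enumerate xs).any g =
      (PySem.List.pyRange 0 (xs.length : Int)).any (fun j => g (j, PySem.List.pyGetD xs j [])) := by
  rw [PySem.List.enumerate_eq_map_pyRange xs [], List.any_map]
  simp only [PySem.List.len]
  rfl

theorem enum_any_cells (xs : List Int) (g : Int × Int → Bool) :
    (PySem.List.enumerate xs).any g =
      (PySem.List.pyRange 0 (xs.length : Int)).any (fun j => g (j, PySem.List.pyGetD xs j 0)) := by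
  rw [PySem.List.enumerate_eq_map_pyRange xs 0, List.any_map]
  simp only [PySem.List.len]
  rfl

theorem any_eq_none (x : Int) (hx : x < 0) (n : Int) (p : Int → Bool) :
    ((PySem.List.pyRange 0 n).any fun i => decide (i = x) && p i) = false := by
  rw [List.any_eq_false]
  intro i hi
  rw [PySem.List.mem_pyRange_one] at hi
  have : ¬ i = x := by omega
  simp [this]

theorem up_bridge (grid : List (List Int)) (m : Nat) (x h : Int) (pr : Int → Bool)
    (hrect : ∀ row ∈ grid, row.length = m) (h0x : 0 ≤ x) (hxm : x < (m : Int)) :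
    ((PySem.List.pyRange 0 (grid.length : Int)).any fun j => pr j &&
        ((PySem.List.pyRange 0 ((PySem.List.pyGetD grid j []).length : Int)).any
          fun w => decide (w = x) && decide (h ≤ PySem.List.pyGetD (PySem.List.pyGetD grid j []) w 0))) =
    ((PySem.List.pyRange 0 (grid.length : Int)).any fun i => pr i && decide (h ≤ idx2 grid i x)) := by
  rw [Bool.eq_iff_iff]
  simp only [List.any_eq_true, PySem.List.mem_pyRange_one, Bool.and_eq_true, decide_eq_true_eq, idx2]
  constructor
  · rintro ⟨j, ⟨hj0, hjn⟩, hjy, w, ⟨hw0, hwm⟩, rfl, hv⟩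
    exact ⟨j, ⟨hj0, hjn⟩, hjy, hv⟩
  · rintro ⟨i, ⟨hi0, hin⟩, hiy, hv⟩
    refine ⟨i, ⟨hi0, hin⟩, hiy, x, ⟨h0x, ?_⟩, rfl, hv⟩
    have hmem : PySem.List.pyGetD grid i [] ∈ grid :=
      PySem.List.pyGetD_mem _ _ (by unfold PySem.Raise.InRange; omega)
    rw [hrect _ hmem]
    exact hxm

theorem row_bridge (grid : List (List Int)) (m : Nat) (y h : Int) (pc : Int → Bool)
    (hrect : ∀ row ∈ grid, row.length = m) (h0y : 0 ≤ y) (hyn : y < (grid.length : Int)) :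
    ((PySem.List.pyRange 0 (grid.length : Int)).any fun j => decide (j = y) &&
        ((PySem.List.pyRange 0 ((PySem.List.pyGetD grid j []).length : Int)).any
          fun w => pc w && decide (h ≤ PySem.List.pyGetD (PySem.List.pyGetD grid j []) w 0))) =
    ((PySem.List.pyRange 0 (m : Int)).any fun i => pc i && decide (h ≤ idx2 grid y i)) := by
  have hlen : (PySem.List.pyGetD grid y []).length = m :=
    hrect _ (PySem.List.pyGetD_mem _ _ (by unfold PySem.Raise.InRange; omega))
  rw [Bool.eq_iff_iff]
  simp only [List.any_eq_true, PySem.List.mem_pyRange_one, Bool.and_eq_true, decide_eq_true_eq, idx2]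
  constructor
  · rintro ⟨j, ⟨hj0, hjn⟩, rfl, w, ⟨hw0, hwm⟩, hc, hv⟩
    rw [hlen] at hwm
    exact ⟨w, ⟨hw0, hwm⟩, hc, hv⟩
  · rintro ⟨i, ⟨hi0, him⟩, hc, hv⟩
    exact ⟨y, ⟨h0y, hyn⟩, rfl, i, ⟨hi0, by rw [hlen]; exact him⟩, hc, hv⟩

-- ===== VERDICT (by name: the statement is the Claim_ definition above) =====
theorem tree_is_hidden_spec : Claim_equal_tree_is_hidden := by
  intro grid pos _ hpre
  obtain ⟨hne, hy, hrect, hx⟩ := hpre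
  obtain ⟨y, x⟩ := pos
  unfold Spec_tree_is_hidden tree_is_hidden tree_is_hidden_alt
  simp only []
  rw [tihA_loop_char, tihA_loop_char, outer_char]
  rw [okh_foldl, okh_foldl, okh_foldl, okh_foldl]
  simp only [okh, Bool.false_or]
  rw [dirVals_any, dirVals_any, dirVals_any, dirVals_any]
  unfold PySem.Raise.InRange at hy hx
  simp only [enum_any_rows, enum_any_cells]
  by_cases h0y : 0 ≤ y
  · by_cases h0x : 0 ≤ x
    · rw [up_bridge grid _ x _ _ hrect h0x (by exact hx.2),
          up_bridge grid _ x _ _ hrect h0x (by exact hx.2),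
          row_bridge grid ((PySem.List.pyGetD grid 0 []).length) y (idx2 grid y x)
            (fun w => decide (w < x)) hrect h0y hy.2,
          row_bridge grid ((PySem.List.pyGetD grid 0 []).length) y (idx2 grid y x)
            (fun w => decide (x < w)) hrect h0y hy.2]
      exact bool_perm _ _ _ _
    · -- x < 0: A never sets hidden_left; B never matches a cell with column index x
      simp only [any_none_below x (by omega), any_eq_none x (by omega)]
      simp
  · -- y < 0: A never sets hidden_top; B never matches a row index equal to or below y
    simp only [any_none_below y (by omega), any_eq_none y (by omega)]
    simp
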